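-- pv_equiv track=rewrite | github.com/nafiislam/bioinfo-ct-assignment | Code/Randomized_Motif_Search/Step1_Randomized_and_modification.py | get_consensus_motif
-- ===== SOURCE A (Python) =====
-- def make_Profile(motifs , k , t , stringList):
--     count = [[],[],[],[]]
--     for i in range(k):
--         count[0].append(1)
--         count[1].append(1)
--         count[2].append(1)
--         count[3].append(1)
--
--     for column in range(k):
--         for row in range(t):
--
--             temp = motifs[row] + column
--
--             if stringList[row][temp] == 'A':
--                 count[0][column] +=1
--             elif stringList[row][temp] == 'C':
--                 count[1][column] +=1
--             elif stringList[row][temp] == 'G':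
--                 count[2][column] +=1
--             else:
--                 count[3][column] +=1
--
--     return count
--
-- def get_consensus_motif(motifs, k,t , stringList):
--     profile = make_Profile(motifs,k,t,stringList)
--     consensus = ""
--     for column in range(k):
--         max = -1
--
--         for row in range(4):
--             if profile[row][column] > max:
--                 max = profile[row][column]
--
--         for row in range(4):
--             if profile[row][column] == max:
--                 if row == 0:
--                     consensus +="A"
--                 elif row == 1:
--                     consensus +="C"
--                 elif row == 2:
--                     consensus +="G"
--                 else:
--                     consensus +="T"
--
--                 break
--
--     return consensus
-- ===== SOURCE B (Python) =====
-- def get_consensus_motif(motifs, k, t, stringList):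
--     # Sort each column's (normalized) characters and take the letter of the first
--     # strictly-longest run; sorted order A<C<G<T gives A's A,C,G,T tie-break for free.
--     out = []
--     for column in range(k):
--         chars = sorted(
--             ch if ch in ('A', 'C', 'G') else 'T'
--             for ch in (stringList[row][motifs[row] + column] for row in range(t))
--         )
--         best_ch, best_len, prev, cur_len = 'A', 0, None, 0
--         for ch in chars:
--             cur_len = cur_len + 1 if ch == prev else 1
--             prev = ch
--             if cur_len > best_len:
--                 best_ch, best_len = ch, cur_len
--         out.append(best_ch)
--     return ''.join(out)
-- ===== Notes on version B (the rewrite author's own statement) =====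
-- stated objective: alternative
-- what changed: Replaces the 4xk pseudocounted profile matrix plus max/first-equal scans by a sort-based algorithm: per column it sorts the t normalized characters and takes the letter of the first strictly-longest run; sortedness in A<C<G<T order reproduces A's tie-break and the uniform +1 pseudocount never changes the argmax.
import Mathlib
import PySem

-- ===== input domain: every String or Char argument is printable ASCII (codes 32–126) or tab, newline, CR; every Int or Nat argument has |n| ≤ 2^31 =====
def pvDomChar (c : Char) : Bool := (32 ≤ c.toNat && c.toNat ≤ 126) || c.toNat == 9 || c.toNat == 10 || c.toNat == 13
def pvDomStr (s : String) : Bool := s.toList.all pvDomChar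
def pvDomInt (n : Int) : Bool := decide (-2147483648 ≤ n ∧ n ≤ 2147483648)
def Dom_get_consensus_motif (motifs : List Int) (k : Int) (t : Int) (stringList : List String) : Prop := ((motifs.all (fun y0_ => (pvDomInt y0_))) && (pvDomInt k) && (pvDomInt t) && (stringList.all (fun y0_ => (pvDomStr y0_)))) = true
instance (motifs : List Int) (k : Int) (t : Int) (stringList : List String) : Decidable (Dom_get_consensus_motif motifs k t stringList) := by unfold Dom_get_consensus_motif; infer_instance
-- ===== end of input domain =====

-- B replaces A's pseudocounted 4×k profile matrix + max/first-equal scans by a sort-based algorithm: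
-- per column it sorts the normalized characters and takes the letter of the first strictly-longest
-- run (objective: alternative; sorted A<C<G<T order reproduces A's tie-break).

-- ===== PORT A =====
-- A's list-of-4-lists `count` is kept as a 4-tuple of lists (count[0],…,count[3]); the in-range
-- writes count[i][column] += 1 use List.set/getD, exact since 0 ≤ column < k = length of each row.
def pvBump (l : List Int) (i : Nat) : List Int := l.set i (l.getD i 0 + 1)

def pvProfStep (motifs : List Int) (stringList : List String) (column : Int)
    (acc : Option (List Int × List Int × List Int × List Int)) (row : Int) :
    Option (List Int × List Int × List Int × List Int) :=
  acc.bind fun count =>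
    match PySem.List.pyGet? motifs row with
    | none => none    -- IndexError: motifs[row]
    | some m =>
      match PySem.List.pyGet? stringList row with
      | none => none  -- IndexError: stringList[row]
      | some s =>
        match PySem.Str.pyGet? s (m + column) with
        | none => none  -- IndexError: stringList[row][temp]
        | some ch =>
          if ch = 'A' then some (pvBump count.1 column.toNat, count.2.1, count.2.2.1, count.2.2.2)
          else if ch = 'C' then some (count.1, pvBump count.2.1 column.toNat, count.2.2.1, count.2.2.2)
          else if ch = 'G' then some (count.1, count.2.1, pvBump count.2.2.1 column.toNat, count.2.2.2)
          else some (count.1, count.2.1, count.2.2.1, pvBump count.2.2.2 column.toNat)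

def make_Profile (motifs : List Int) (k : Int) (t : Int) (stringList : List String) :
    Option (List Int × List Int × List Int × List Int) :=
  let count := (PySem.List.pyRange 0 k 1).foldl
    (fun (c : List Int × List Int × List Int × List Int) _ =>
      (c.1 ++ [1], c.2.1 ++ [1], c.2.2.1 ++ [1], c.2.2.2 ++ [1])) ([], [], [], [])
  (PySem.List.pyRange 0 k 1).foldl
    (fun acc column => (PySem.List.pyRange 0 t 1).foldl (pvProfStep motifs stringList column) acc)
    (some count)

def pvRowAt (p : List Int × List Int × List Int × List Int) (row : Int) : List Int :=
  if row = 0 then p.1 else if row = 1 then p.2.1 else if row = 2 then p.2.2.1 else p.2.2.2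

def get_consensus_motif (motifs : List Int) (k : Int) (t : Int) (stringList : List String) : String :=
  match make_Profile motifs k t stringList with
  | none => ""    -- Python A raised IndexError here; Pre_ excludes these inputs
  | some profile =>
    (PySem.List.pyRange 0 k 1).foldl (fun consensus column =>
      let m := (PySem.List.pyRange 0 4 1).foldl (fun m row =>
        if (pvRowAt profile row).getD column.toNat 0 > m
        then (pvRowAt profile row).getD column.toNat 0 else m) (-1)
      -- 'for row in range(4): if profile[row][column] == max: <append letter>; break'
      -- = first row (in order 0,1,2,3) whose count equals max, as a first-match chain
      if (pvRowAt profile 0).getD column.toNat 0 = m then consensus ++ "A"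
      else if (pvRowAt profile 1).getD column.toNat 0 = m then consensus ++ "C"
      else if (pvRowAt profile 2).getD column.toNat 0 = m then consensus ++ "G"
      else if (pvRowAt profile 3).getD column.toNat 0 = m then consensus ++ "T"
      else consensus) ""

-- ===== PORT B =====
-- ch in ('A','C','G') is tuple membership = this disjunction
def pvNorm (ch : Char) : Char := if ch = 'A' ∨ ch = 'C' ∨ ch = 'G' then ch else 'T'

-- the generator (pvNorm applied to stringList[row][motifs[row]+column] for row in range(t));
-- none = IndexError at one of the three lookups
def pvColChars (motifs : List Int) (stringList : List String) (t column : Int) : Option (List Char) :=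
  (PySem.List.pyRange 0 t 1).foldl (fun acc row =>
    acc.bind fun l =>
      (PySem.List.pyGet? motifs row).bind fun m =>
      (PySem.List.pyGet? stringList row).bind fun s =>
      (PySem.Str.pyGet? s (m + column)).map fun ch => l ++ [pvNorm ch]) (some [])

-- one step of the run-length scan; state = (best_ch, best_len, prev, cur_len)
def pvRunStep (st : Char × Int × Option Char × Int) (ch : Char) : Char × Int × Option Char × Int :=
  let cur := if some ch = st.2.2.1 then st.2.2.2 + 1 else 1
  if cur > st.2.1 then (ch, cur, some ch, cur) else (st.1, st.2.1, some ch, cur)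

def get_consensus_motif_alt (motifs : List Int) (k : Int) (t : Int) (stringList : List String) : String :=
  let res := (PySem.List.pyRange 0 k 1).foldl (fun (acc : Option (List String)) column =>
    acc.bind fun out =>
      match pvColChars motifs stringList t column with
      | none => none
      | some g =>
        let chars := PySem.List.sorted g (fun x => x) false
        some (out ++ [String.singleton (chars.foldl pvRunStep ('A', 0, none, 0)).1])) (some [])
  match res with
  | none => ""    -- Python B raised IndexError here; Pre_ excludes these inputs
  | some out => PySem.Str.join "" out

-- ===== PRECONDITION & SPEC =====
-- per-row index condition: both row lookups succeed and every column index
-- motifs[row] + column, 0 ≤ column < k, is in range of the row's string (the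
-- condition is monotone in column, so only the extreme columns 0 and k-1 matter)
def pvColOk (k : Int) (motifs : List Int) (stringList : List String) (row : Int) : Bool :=
  match PySem.List.pyGet? motifs row, PySem.List.pyGet? stringList row with
  | some m, some s => decide (-PySem.Str.len s ≤ m ∧ m + (k - 1) < PySem.Str.len s)
  | _, _ => false

-- Pre_ excludes exactly the inputs on which A raises IndexError: some executed access
-- motifs[row], stringList[row] or stringList[row][motifs[row] + column] is out of range.
def Pre_get_consensus_motif (motifs : List Int) (k : Int) (t : Int) (stringList : List String) : Prop :=
  0 < k ∧ 0 < t →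
    (decide (t ≤ PySem.List.len motifs) && decide (t ≤ PySem.List.len stringList) &&
     (PySem.List.pyRange 0 t 1).all (pvColOk k motifs stringList)) = true
instance (motifs : List Int) (k : Int) (t : Int) (stringList : List String) : Decidable (Pre_get_consensus_motif motifs k t stringList) := by unfold Pre_get_consensus_motif; infer_instance

def pvWitness_get_consensus_motif : List Int × Int × Int × List String :=
  ([0, 0], 2, 2, ["AC", "AG"])

def Spec_get_consensus_motif (motifs : List Int) (k : Int) (t : Int) (stringList : List String) (out : String) : Prop := out = get_consensus_motif_alt motifs k t stringList
instance (motifs : List Int) (k : Int) (t : Int) (stringList : List String) (out : String) : Decidable (Spec_get_consensus_motif motifs k t stringList out) := by unfold Spec_get_consensus_motif; infer_instance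

-- ===== CLAIM (what is proved, stated in full; the proofs are below) =====
def Claim_equal_get_consensus_motif : Prop := ∀ (motifs : List Int) (k : Int) (t : Int) (stringList : List String), Dom_get_consensus_motif motifs k t stringList → Pre_get_consensus_motif motifs k t stringList → Spec_get_consensus_motif motifs k t stringList (get_consensus_motif motifs k t stringList)

-- ===== LEMMAS AND PROOFS =====

-- reference per-column tally, shared shape of both proofs
def pvTupStep (motifs : List Int) (stringList : List String) (column : Int)
    (acc : Option (Int × Int × Int × Int)) (row : Int) : Option (Int × Int × Int × Int) :=
  acc.bind fun q =>
    match PySem.List.pyGet? motifs row with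
    | none => none
    | some m =>
      match PySem.List.pyGet? stringList row with
      | none => none
      | some s =>
        match PySem.Str.pyGet? s (m + column) with
        | none => none
        | some ch =>
          if ch = 'A' then some (q.1 + 1, q.2.1, q.2.2.1, q.2.2.2)
          else if ch = 'C' then some (q.1, q.2.1 + 1, q.2.2.1, q.2.2.2)
          else if ch = 'G' then some (q.1, q.2.1, q.2.2.1 + 1, q.2.2.2)
          else some (q.1, q.2.1, q.2.2.1, q.2.2.2 + 1)

def pvColCnt (motifs : List Int) (stringList : List String) (t : Int) (column : Int) :
    Option (Int × Int × Int × Int) :=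
  (PySem.List.pyRange 0 t 1).foldl (pvTupStep motifs stringList column) (some (1, 1, 1, 1))

def pvValuesAt (cnt : List Int × List Int × List Int × List Int) (i : Nat) : Int × Int × Int × Int :=
  (cnt.1.getD i 0, cnt.2.1.getD i 0, cnt.2.2.1.getD i 0, cnt.2.2.2.getD i 0)

def pvSetQ (cnt : List Int × List Int × List Int × List Int) (i : Nat) (q : Int × Int × Int × Int) :
    List Int × List Int × List Int × List Int :=
  (cnt.1.set i q.1, cnt.2.1.set i q.2.1, cnt.2.2.1.set i q.2.2.1, cnt.2.2.2.set i q.2.2.2)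

def pvSel (q : Int × Int × Int × Int) : String :=
  let m := [q.1, q.2.1, q.2.2.1, q.2.2.2].foldl (fun m v => if v > m then v else m) (-1)
  if q.1 = m then "A" else if q.2.1 = m then "C" else if q.2.2.1 = m then "G"
  else if q.2.2.2 = m then "T" else ""

def pvLookupOk (motifs : List Int) (stringList : List String) (row : Int) (column : Int) : Bool :=
  ((PySem.List.pyGet? motifs row).bind fun m =>
    (PySem.List.pyGet? stringList row).bind fun s =>
      PySem.Str.pyGet? s (m + column)).isSome

def pvLookup (motifs : List Int) (stringList : List String) (r c : Int) : Option Char :=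
  (PySem.List.pyGet? motifs r).bind fun m =>
    (PySem.List.pyGet? stringList r).bind fun s => PySem.Str.pyGet? s (m + c)

def pvBumpQ (q : Int × Int × Int × Int) (ch : Char) : Int × Int × Int × Int :=
  if ch = 'A' then (q.1 + 1, q.2.1, q.2.2.1, q.2.2.2)
  else if ch = 'C' then (q.1, q.2.1 + 1, q.2.2.1, q.2.2.2)
  else if ch = 'G' then (q.1, q.2.1, q.2.2.1 + 1, q.2.2.2)
  else (q.1, q.2.1, q.2.2.1, q.2.2.2 + 1)

-- the pseudocounted tally of a character list
def pvGQ (l : List Char) : Int × Int × Int × Int :=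
  (1 + (l.count 'A' : Int), 1 + (l.count 'C' : Int), 1 + (l.count 'G' : Int), 1 + (l.count 'T' : Int))

-- the sorted form of an {A,C,G,T}-list
def pvCanon (l : List Char) : List Char :=
  List.replicate (l.count 'A') 'A' ++ (List.replicate (l.count 'C') 'C' ++
  (List.replicate (l.count 'G') 'G' ++ List.replicate (l.count 'T') 'T'))

lemma pvFoldlNone {α β : Type} (f : Option α → β → Option α)
    (hf : ∀ b, f none b = none) (L : List β) : L.foldl f none = none := by
  induction L with
  | nil => rfl
  | cons b L ih => simpa [hf] using ih

lemma getD_set_self (l : List Int) (i : Nat) (h : i < l.length) (v : Int) :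
    (l.set i v).getD i 0 = v := by
  rw [List.getD_eq_getElem _ 0 (by simpa using h)]; simp

lemma set_getD_self (l : List Int) (i : Nat) (h : i < l.length) :
    l.set i (l.getD i 0) = l := by
  rw [List.getD_eq_getElem l 0 h]; exact List.set_getElem_self ..

lemma pvLookupOk_eq (motifs : List Int) (stringList : List String) (r c : Int) :
    pvLookupOk motifs stringList r c = (pvLookup motifs stringList r c).isSome := rfl

-- Pre_ implies every executed lookup succeeds
lemma pvPreLookup (motifs : List Int) (k t : Int) (stringList : List String)
    (hpre : Pre_get_consensus_motif motifs k t stringList) :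
    ∀ c ∈ PySem.List.pyRange 0 k 1, ∀ r ∈ PySem.List.pyRange 0 t 1,
      pvLookupOk motifs stringList r c = true := by
  intro c hc r hr
  have hck := PySem.List.mem_pyRange_one.mp hc
  have hrt := PySem.List.mem_pyRange_one.mp hr
  have h := hpre ⟨by omega, by omega⟩
  simp only [Bool.and_eq_true, List.all_eq_true, decide_eq_true_eq] at h
  obtain ⟨⟨hm, hs⟩, hall⟩ := h
  have hok := hall r hr
  unfold pvLookupOk
  unfold pvColOk at hok
  cases hm2 : PySem.List.pyGet? motifs r with
  | none => rw [hm2] at hok; simp at hok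
  | some m =>
    rw [hm2] at hok
    cases hs2 : PySem.List.pyGet? stringList r with
    | none => rw [hs2] at hok; simp at hok
    | some s =>
      rw [hs2] at hok
      simp only [decide_eq_true_eq] at hok
      simp only [Option.bind_some]
      rw [Option.isSome_iff_ne_none]
      intro hnone
      have hir := (PySem.List.pyGet?_eq_none_iff s.toList (m + c)).mp hnone
      have hlen := PySem.Str.len_eq s
      exact hir ⟨by omega, by omega⟩

lemma pvTupStep_eq (motifs : List Int) (stringList : List String) (c : Int)
    (q : Int × Int × Int × Int) (r : Int) :
    pvTupStep motifs stringList c (some q) r =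
      (pvLookup motifs stringList r c).map (pvBumpQ q) := by
  unfold pvTupStep pvLookup pvBumpQ
  simp only [Option.bind_some]
  cases PySem.List.pyGet? motifs r
  · rfl
  case some m =>
  dsimp only [Option.bind_some]
  cases PySem.List.pyGet? stringList r
  · rfl
  case some s =>
  dsimp only [Option.bind_some]
  cases PySem.Str.pyGet? s (m + c)
  · rfl
  case some ch =>
  dsimp only [Option.map_some]
  split_ifs <;> rfl

lemma pvProfStep_eq (motifs : List Int) (stringList : List String) (c : Int)
    (cnt : List Int × List Int × List Int × List Int) (r : Int)
    (h1 : c.toNat < cnt.1.length) (h2 : c.toNat < cnt.2.1.length)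
    (h3 : c.toNat < cnt.2.2.1.length) (h4 : c.toNat < cnt.2.2.2.length) :
    pvProfStep motifs stringList c (some cnt) r =
      (pvLookup motifs stringList r c).map
        (fun ch => pvSetQ cnt c.toNat (pvBumpQ (pvValuesAt cnt c.toNat) ch)) := by
  unfold pvProfStep pvLookup
  simp only [Option.bind_some]
  cases PySem.List.pyGet? motifs r
  · rfl
  case some m =>
  dsimp only [Option.bind_some]
  cases PySem.List.pyGet? stringList r
  · rfl
  case some s =>
  dsimp only [Option.bind_some]
  cases PySem.Str.pyGet? s (m + c)
  · rfl
  case some ch =>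
  dsimp only [Option.bind_some]
  simp only [Option.map_some]
  unfold pvBumpQ pvValuesAt pvSetQ pvBump
  split_ifs <;>
    (apply congrArg some;
     refine Prod.ext ?_ (Prod.ext ?_ (Prod.ext ?_ ?_)) <;>
     simp [set_getD_self, h1, h2, h3, h4])

lemma pvSetQ_setQ (cnt : List Int × List Int × List Int × List Int) (i : Nat)
    (q q' : Int × Int × Int × Int) : pvSetQ (pvSetQ cnt i q) i q' = pvSetQ cnt i q' := by
  simp [pvSetQ, List.set_set]

lemma pvValuesAt_setQ_self (cnt : List Int × List Int × List Int × List Int) (i : Nat)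
    (q : Int × Int × Int × Int)
    (h1 : i < cnt.1.length) (h2 : i < cnt.2.1.length)
    (h3 : i < cnt.2.2.1.length) (h4 : i < cnt.2.2.2.length) :
    pvValuesAt (pvSetQ cnt i q) i = q := by
  simp [pvValuesAt, pvSetQ, getD_set_self, h1, h2, h3, h4]

lemma pvValuesAt_setQ_ne (cnt : List Int × List Int × List Int × List Int) (i j : Nat)
    (h : i ≠ j) (q : Int × Int × Int × Int) :
    pvValuesAt (pvSetQ cnt i q) j = pvValuesAt cnt j := by
  unfold pvValuesAt pvSetQ
  simp [List.getD, List.getElem?_set_ne h]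

-- (L1) A's inner row loop writes column `c` only and there tallies exactly pvTupStep
lemma pvInnerA (motifs : List Int) (stringList : List String) (c : Int)
    (rows : List Int) :
    ∀ cnt : List Int × List Int × List Int × List Int,
    c.toNat < cnt.1.length → c.toNat < cnt.2.1.length →
    c.toNat < cnt.2.2.1.length → c.toNat < cnt.2.2.2.length →
    rows.foldl (pvProfStep motifs stringList c) (some cnt) =
      (rows.foldl (pvTupStep motifs stringList c) (some (pvValuesAt cnt c.toNat))).map
        (fun q => pvSetQ cnt c.toNat q) := by
  induction rows with
  | nil =>
    intro cnt h1 h2 h3 h4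
    simp only [List.foldl_nil, Option.map_some]
    rw [show pvSetQ cnt c.toNat (pvValuesAt cnt c.toNat) = cnt by
      simp [pvSetQ, pvValuesAt, set_getD_self, h1, h2, h3, h4]]
  | cons r rows ih =>
    intro cnt h1 h2 h3 h4
    simp only [List.foldl_cons]
    rw [pvProfStep_eq motifs stringList c cnt r h1 h2 h3 h4,
        pvTupStep_eq motifs stringList c _ r]
    cases hl : pvLookup motifs stringList r c with
    | none =>
      simp only [Option.map_none]
      rw [pvFoldlNone _ (fun b => rfl), pvFoldlNone _ (fun b => rfl)]
      rfl
    | some ch =>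
      simp only [Option.map_some]
      have h1' : c.toNat < (pvSetQ cnt c.toNat (pvBumpQ (pvValuesAt cnt c.toNat) ch)).1.length := by
        simpa [pvSetQ] using h1
      have h2' : c.toNat < (pvSetQ cnt c.toNat (pvBumpQ (pvValuesAt cnt c.toNat) ch)).2.1.length := by
        simpa [pvSetQ] using h2
      have h3' : c.toNat < (pvSetQ cnt c.toNat (pvBumpQ (pvValuesAt cnt c.toNat) ch)).2.2.1.length := by
        simpa [pvSetQ] using h3
      have h4' : c.toNat < (pvSetQ cnt c.toNat (pvBumpQ (pvValuesAt cnt c.toNat) ch)).2.2.2.length := by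
        simpa [pvSetQ] using h4
      rw [ih _ h1' h2' h3' h4',
          pvValuesAt_setQ_self cnt c.toNat _ h1 h2 h3 h4]
      cases (rows.foldl (pvTupStep motifs stringList c)
          (some (pvBumpQ (pvValuesAt cnt c.toNat) ch))) with
      | none => rfl
      | some q => simp [pvSetQ_setQ]

-- (L3) A's outer column loop: each column ends up carrying its pvColCnt tally
lemma pvOuterA (motifs : List Int) (stringList : List String) (t : Int) :
    ∀ (L : List Int) (cnt : List Int × List Int × List Int × List Int) (n : Nat),
    cnt.1.length = n → cnt.2.1.length = n → cnt.2.2.1.length = n → cnt.2.2.2.length = n →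
    (∀ c ∈ L, 0 ≤ c ∧ c.toNat < n) → L.Nodup →
    (∀ c ∈ L, pvValuesAt cnt c.toNat = (1, 1, 1, 1)) →
    (∀ c ∈ L, (pvColCnt motifs stringList t c).isSome) →
    ∃ P, L.foldl (fun acc column =>
        (PySem.List.pyRange 0 t 1).foldl (pvProfStep motifs stringList column) acc) (some cnt) = some P
      ∧ (∀ c ∈ L, ∀ q, pvColCnt motifs stringList t c = some q → pvValuesAt P c.toNat = q)
      ∧ (∀ j : Nat, (∀ c ∈ L, c.toNat ≠ j) → pvValuesAt P j = pvValuesAt cnt j) := by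
  intro L
  induction L with
  | nil =>
    intro cnt n _ _ _ _ _ _ _ _
    exact ⟨cnt, rfl, by simp, fun j _ => rfl⟩
  | cons c L ih =>
    intro cnt n hl1 hl2 hl3 hl4 hbound hnodup hones hsome
    have hc := hbound c (by simp)
    have hcn1 : c.toNat < cnt.1.length := by omega
    have hcn2 : c.toNat < cnt.2.1.length := by omega
    have hcn3 : c.toNat < cnt.2.2.1.length := by omega
    have hcn4 : c.toNat < cnt.2.2.2.length := by omega
    simp only [List.foldl_cons]
    rw [pvInnerA motifs stringList c _ cnt hcn1 hcn2 hcn3 hcn4,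
        hones c (by simp)]
    obtain ⟨q, hq⟩ := Option.isSome_iff_exists.mp (hsome c (by simp))
    rw [show (PySem.List.pyRange 0 t 1).foldl (pvTupStep motifs stringList c) (some (1,1,1,1))
        = pvColCnt motifs stringList t c from rfl, hq]
    simp only [Option.map_some]
    set cnt' := pvSetQ cnt c.toNat q with hcnt'
    have htoNat : ∀ c' ∈ L, c'.toNat ≠ c.toNat := by
      intro c' hc'
      have hne : c' ≠ c := by
        rintro rfl; exact (List.nodup_cons.mp hnodup).1 hc'
      have := (hbound c' (by simp [hc'])).1
      omega
    obtain ⟨P, hP, hPvals, hPun⟩ := ih cnt' n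
      (by simp [hcnt', pvSetQ, hl1]) (by simp [hcnt', pvSetQ, hl2])
      (by simp [hcnt', pvSetQ, hl3]) (by simp [hcnt', pvSetQ, hl4])
      (fun c' hc' => hbound c' (by simp [hc'])) (List.nodup_cons.mp hnodup).2
      (fun c' hc' => by
        rw [hcnt', pvValuesAt_setQ_ne cnt c.toNat c'.toNat (fun h => htoNat c' hc' h.symm) q]
        exact hones c' (by simp [hc']))
      (fun c' hc' => hsome c' (by simp [hc']))
    refine ⟨P, hP, ?_, ?_⟩
    · intro c0 hc0 q0 hq0
      rcases List.mem_cons.mp hc0 with rfl | hc0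
      · rw [hq] at hq0
        injection hq0 with hq0
        subst hq0
        rw [hPun c0.toNat (fun c' hc' => htoNat c' hc'), hcnt',
            pvValuesAt_setQ_self cnt c0.toNat q hcn1 hcn2 hcn3 hcn4]
      · exact hPvals c0 hc0 q0 hq0
    · intro j hj
      rw [hPun j (fun c' hc' => hj c' (by simp [hc'])), hcnt',
          pvValuesAt_setQ_ne cnt c.toNat j (hj c (by simp)) q]

-- A's init loop builds four all-ones rows of length k
lemma pvInitA (L : List Int) :
    L.foldl (fun (c : List Int × List Int × List Int × List Int) _ =>
      (c.1 ++ [1], c.2.1 ++ [1], c.2.2.1 ++ [1], c.2.2.2 ++ [1])) ([], [], [], []) =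
    (List.replicate L.length 1, List.replicate L.length 1,
     List.replicate L.length 1, List.replicate L.length 1) := by
  have h : ∀ (L : List Int) (c : List Int × List Int × List Int × List Int),
      L.foldl (fun (c : List Int × List Int × List Int × List Int) _ =>
        (c.1 ++ [1], c.2.1 ++ [1], c.2.2.1 ++ [1], c.2.2.2 ++ [1])) c =
      (c.1 ++ List.replicate L.length 1, c.2.1 ++ List.replicate L.length 1,
       c.2.2.1 ++ List.replicate L.length 1, c.2.2.2 ++ List.replicate L.length 1) := by
    intro L
    induction L with
    | nil => intro c; simp
    | cons x L ih => intro c; simp [List.foldl_cons, ih, List.replicate_succ]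
  simpa using h L ([], [], [], [])

-- bumping the tally = appending the normalized character
lemma pvGQ_bump (l : List Char) (ch : Char) :
    pvBumpQ (pvGQ l) ch = pvGQ (l ++ [pvNorm ch]) := by
  unfold pvBumpQ pvGQ pvNorm
  by_cases hA : ch = 'A'
  · subst hA; simp [List.count_append]; ring
  by_cases hC : ch = 'C'
  · subst hC; simp [List.count_append]; ring
  by_cases hG : ch = 'G'
  · subst hG; simp [List.count_append]; ring
  · simp only [hA, hC, hG, if_false, or_self]
    simp [List.count_append]
    ring

-- (L4) the tally fold is pvGQ of the character fold
lemma pvCntChars (motifs : List Int) (stringList : List String) (c : Int)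
    (rows : List Int) :
    ∀ l : List Char,
    rows.foldl (pvTupStep motifs stringList c) (some (pvGQ l)) =
      (rows.foldl (fun acc row =>
        acc.bind fun l =>
          (PySem.List.pyGet? motifs row).bind fun m =>
          (PySem.List.pyGet? stringList row).bind fun s =>
          (PySem.Str.pyGet? s (m + c)).map fun ch => l ++ [pvNorm ch]) (some l)).map pvGQ := by
  induction rows with
  | nil => intro l; simp
  | cons r rows ih =>
    intro l
    simp only [List.foldl_cons]
    rw [pvTupStep_eq motifs stringList c _ r]
    have hstep : ((some l).bind fun l =>
        (PySem.List.pyGet? motifs r).bind fun m =>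
        (PySem.List.pyGet? stringList r).bind fun s =>
        (PySem.Str.pyGet? s (m + c)).map fun ch => l ++ [pvNorm ch]) =
        (pvLookup motifs stringList r c).map fun ch => l ++ [pvNorm ch] := by
      unfold pvLookup
      simp only [Option.bind_some]
      cases PySem.List.pyGet? motifs r
      · rfl
      case some m =>
      dsimp only [Option.bind_some]
      cases PySem.List.pyGet? stringList r
      · rfl
      case some s =>
      dsimp only [Option.bind_some]
    rw [hstep]
    cases hl : pvLookup motifs stringList r c with
    | none =>
      simp only [Option.map_none]
      rw [pvFoldlNone _ (fun b => rfl), pvFoldlNone _ (fun b => rfl)]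
      rfl
    | some ch =>
      simp only [Option.map_some]
      rw [pvGQ_bump l ch, ih (l ++ [pvNorm ch])]

lemma pvColCnt_eq_gq (motifs : List Int) (stringList : List String) (t c : Int) :
    pvColCnt motifs stringList t c = (pvColChars motifs stringList t c).map pvGQ := by
  have h0 : pvGQ [] = (1, 1, 1, 1) := by decide
  unfold pvColCnt pvColChars
  rw [← h0, pvCntChars motifs stringList c _ []]

-- characters produced by the generator lie in {A,C,G,T}
lemma pvColChars_alpha (motifs : List Int) (stringList : List String) (t c : Int) :
    ∀ l, pvColChars motifs stringList t c = some l →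
      ∀ x ∈ l, x = 'A' ∨ x = 'C' ∨ x = 'G' ∨ x = 'T' := by
  unfold pvColChars
  have main : ∀ (rows : List Int) (l0 : List Char),
      (∀ x ∈ l0, x = 'A' ∨ x = 'C' ∨ x = 'G' ∨ x = 'T') →
      ∀ l, rows.foldl (fun acc row =>
        acc.bind fun l =>
          (PySem.List.pyGet? motifs row).bind fun m =>
          (PySem.List.pyGet? stringList row).bind fun s =>
          (PySem.Str.pyGet? s (m + c)).map fun ch => l ++ [pvNorm ch]) (some l0) = some l →
      ∀ x ∈ l, x = 'A' ∨ x = 'C' ∨ x = 'G' ∨ x = 'T' := by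
    intro rows
    induction rows with
    | nil => intro l0 h0 l hl; simp at hl; subst hl; exact h0
    | cons r rows ih =>
      intro l0 h0 l hl
      simp only [List.foldl_cons, Option.bind_some] at hl
      rcases hstep : ((PySem.List.pyGet? motifs r).bind fun m =>
          (PySem.List.pyGet? stringList r).bind fun s =>
          (PySem.Str.pyGet? s (m + c)).map fun ch => l0 ++ [pvNorm ch]) with _ | l1
      · rw [hstep, pvFoldlNone _ (fun b => rfl)] at hl; exact absurd hl (by simp)
      · rw [hstep] at hl
        have hex : ∃ ch, l1 = l0 ++ [pvNorm ch] := by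
          cases hm : PySem.List.pyGet? motifs r with
          | none => rw [hm] at hstep; simp at hstep
          | some m =>
            rw [hm] at hstep
            simp only [Option.bind_some] at hstep
            cases hs : PySem.List.pyGet? stringList r with
            | none => rw [hs] at hstep; simp at hstep
            | some s =>
              rw [hs] at hstep
              simp only [Option.bind_some] at hstep
              cases hc2 : PySem.Str.pyGet? s (m + c) with
              | none => rw [hc2] at hstep; simp at hstep
              | some ch =>
                rw [hc2] at hstep
                simp only [Option.bind_some, Option.map_some, Option.some_inj] at hstep
                exact ⟨ch, hstep.symm⟩
        obtain ⟨ch, rfl⟩ := hex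
        refine ih (l0 ++ [pvNorm ch]) ?_ l hl
        intro x hx
        rcases List.mem_append.mp hx with hx | hx
        · exact h0 x hx
        · have hx' : x = pvNorm ch := by simpa using hx
          subst hx'
          unfold pvNorm
          split_ifs with h
          · rcases h with h | h | h <;> simp [h]
          · simp
  exact fun l hl => main _ [] (by simp) l hl

-- sorted(l) of an {A,C,G,T}-list is its canonical block form
lemma pvSorted_canon (l : List Char)
    (h : ∀ x ∈ l, x = 'A' ∨ x = 'C' ∨ x = 'G' ∨ x = 'T') :
    PySem.List.sorted l (fun x => x) false = pvCanon l := by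
  have hperm : (pvCanon l).Perm l := by
    rw [List.perm_iff_count]
    intro x
    by_cases hx : x = 'A' ∨ x = 'C' ∨ x = 'G' ∨ x = 'T'
    · rcases hx with rfl | rfl | rfl | rfl <;>
        simp [pvCanon, List.count_append, List.count_replicate]
    · have hnot : x ∉ l := fun hm => hx (h x hm)
      rw [List.count_eq_zero.mpr hnot, List.count_eq_zero]
      intro hm
      unfold pvCanon at hm
      simp only [List.mem_append, List.mem_replicate] at hm
      rcases hm with ⟨_, rfl⟩ | ⟨_, rfl⟩ | ⟨_, rfl⟩ | ⟨_, rfl⟩ <;>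
        exact hx (by simp)
  have hpair : (pvCanon l).Pairwise (fun a b => a ≤ b) := by
    unfold pvCanon
    refine List.pairwise_append.mpr ⟨?_, ?_, ?_⟩
    · exact List.pairwise_replicate.mpr (Or.inr (le_refl 'A'))
    · refine List.pairwise_append.mpr ⟨List.pairwise_replicate.mpr (Or.inr (le_refl 'C')), ?_, ?_⟩
      · refine List.pairwise_append.mpr ⟨List.pairwise_replicate.mpr (Or.inr (le_refl 'G')),
          List.pairwise_replicate.mpr (Or.inr (le_refl 'T')), ?_⟩
        intro a ha b hb
        rw [(List.eq_of_mem_replicate ha : a = 'G'), (List.eq_of_mem_replicate hb : b = 'T')]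
        decide
      · intro a ha b hb
        rw [(List.eq_of_mem_replicate ha : a = 'C')]
        rcases List.mem_append.mp hb with hb | hb
        · rw [(List.eq_of_mem_replicate hb : b = 'G')]; decide
        · rw [(List.eq_of_mem_replicate hb : b = 'T')]; decide
    · intro a ha b hb
      rw [(List.eq_of_mem_replicate ha : a = 'A')]
      rcases List.mem_append.mp hb with hb | hb
      · rw [(List.eq_of_mem_replicate hb : b = 'C')]; decide
      · rcases List.mem_append.mp hb with hb | hb
        · rw [(List.eq_of_mem_replicate hb : b = 'G')]; decide
        · rw [(List.eq_of_mem_replicate hb : b = 'T')]; decide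
  exact PySem.List.sorted_id_eq_of_perm_of_pairwise l (pvCanon l) hperm hpair

-- run scan over a block whose character equals the running one
lemma pvRunRep (c : Char) :
    ∀ (m : Nat) (b : Char) (bl cl : Int), cl ≤ bl →
    (List.replicate m c).foldl pvRunStep (b, bl, some c, cl) =
      ((if cl + m > bl then c else b), (if cl + m > bl then cl + m else bl), some c, cl + m) := by
  intro m
  induction m with
  | zero =>
    intro b bl cl hle
    simp only [List.replicate, List.foldl_nil, Nat.cast_zero, add_zero]
    rw [if_neg (by omega), if_neg (by omega)]
  | succ m ih =>
    intro b bl cl hle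
    rw [List.replicate_succ, List.foldl_cons]
    have hst : pvRunStep (b, bl, some c, cl) c =
        if cl + 1 > bl then (c, cl + 1, some c, cl + 1) else (b, bl, some c, cl + 1) := by
      simp [pvRunStep]
    rw [hst]
    by_cases hgt : cl + 1 > bl
    · rw [if_pos hgt, ih c (cl + 1) (cl + 1) le_rfl]
      simp only [Prod.ext_iff]
      push_cast
      refine ⟨?_, ?_, trivial, by ring⟩
      · split_ifs <;> first | rfl | (exfalso; omega)
      · split_ifs <;> omega
    · rw [if_neg hgt, ih b bl (cl + 1) (by omega)]
      simp only [Prod.ext_iff]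
      push_cast
      refine ⟨?_, ?_, trivial, by ring⟩
      · split_ifs <;> first | rfl | (exfalso; omega)
      · split_ifs <;> omega

lemma pvRunBlock (c : Char) (n : Nat) (b : Char) (bl : Int) (p : Option Char) (cl : Int)
    (hp : p ≠ some c) (hbl : 0 ≤ bl) :
    (List.replicate n c).foldl pvRunStep (b, bl, p, cl) =
      ((if (n : Int) > bl then c else b), (if (n : Int) > bl then (n : Int) else bl),
       (if n = 0 then p else some c), (if n = 0 then cl else (n : Int))) := by
  cases n with
  | zero =>
    simp only [List.replicate, List.foldl_nil, Nat.cast_zero]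
    rw [if_neg (by omega), if_neg (by omega)]
    simp
  | succ m =>
    rw [List.replicate_succ, List.foldl_cons]
    have hne : ¬ some c = p := fun h => hp h.symm
    have hst : pvRunStep (b, bl, p, cl) c =
        if 1 > bl then (c, 1, some c, 1) else (b, bl, some c, 1) := by
      simp [pvRunStep, hne]
    rw [hst]
    by_cases h1 : (1 : Int) > bl
    · rw [if_pos h1, pvRunRep c m c 1 1 le_rfl]
      simp only [Prod.ext_iff, if_neg (Nat.succ_ne_zero m)]
      push_cast
      refine ⟨?_, ?_, trivial, by ring⟩
      · split_ifs <;> first | rfl | (exfalso; omega)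
      · split_ifs <;> omega
    · rw [if_neg h1, pvRunRep c m b bl 1 (by omega)]
      simp only [Prod.ext_iff, if_neg (Nat.succ_ne_zero m)]
      push_cast
      refine ⟨?_, ?_, trivial, by ring⟩
      · split_ifs <;> first | rfl | (exfalso; omega)
      · split_ifs <;> omega

-- the per-column letter: run scan over the sorted column = A's max/first-equal selection
lemma pvColLetter (l : List Char)
    (h : ∀ x ∈ l, x = 'A' ∨ x = 'C' ∨ x = 'G' ∨ x = 'T') :
    String.singleton ((PySem.List.sorted l (fun x => x) false).foldl pvRunStep ('A', 0, none, 0)).1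
      = pvSel (pvGQ l) := by
  rw [pvSorted_canon l h]
  unfold pvCanon pvGQ
  set a := l.count 'A'
  set c := l.count 'C'
  set g := l.count 'G'
  set t := l.count 'T'
  rw [List.foldl_append, List.foldl_append, List.foldl_append]
  rw [pvRunBlock 'A' a 'A' 0 none 0 (by simp) le_rfl]
  rw [pvRunBlock 'C' c _ _ _ _ (by split_ifs <;> simp) (by split_ifs <;> omega)]
  rw [pvRunBlock 'G' g _ _ _ _ (by split_ifs <;> simp) (by split_ifs <;> omega)]
  rw [pvRunBlock 'T' t _ _ _ _ (by split_ifs <;> simp) (by split_ifs <;> omega)]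
  unfold pvSel
  simp only [List.foldl_cons, List.foldl_nil, ite_self]
  have hA0 : (if (a : Int) > 0 then (a : Int) else (0 : Int)) = (a : Int) := by
    split_ifs <;> omega
  simp only [hA0]
  simp only [if_pos (show (1 : Int) + a > -1 by omega)]
  by_cases hc : (c : Int) > (a : Int)
  · simp only [if_pos hc, if_pos hc, if_pos (show (1:Int) + c > 1 + a by omega),
        if_neg (show ¬ (1:Int) + a = 1 + c by omega)]
    by_cases hg : (g : Int) > (c : Int)
    · simp only [if_pos hg, if_pos hg, if_pos (show (1:Int) + g > 1 + c by omega),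
          if_neg (show ¬ (1:Int) + c = 1 + g by omega)]
      by_cases ht : (t : Int) > (g : Int)
      · simp only [if_pos ht, if_pos (show (1:Int) + t > 1 + g by omega),
            if_neg (show ¬ (1:Int) + a = 1 + t by omega),
            if_neg (show ¬ (1:Int) + c = 1 + t by omega),
            if_neg (show ¬ (1:Int) + g = 1 + t by omega),
            if_pos (show (1:Int) + t = 1 + t by omega)]
        simp only [if_true]
        first | rfl | (split_ifs <;> first | rfl | (exfalso; omega))
      · simp only [if_neg ht, if_neg (show ¬ (1:Int) + t > 1 + g by omega),
            if_neg (show ¬ (1:Int) + c = 1 + g by omega),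
            if_pos (show (1:Int) + g = 1 + g by omega)]
        simp only [if_true]
        first | rfl | (split_ifs <;> first | rfl | (exfalso; omega))
    · simp only [if_neg hg, if_neg hg, if_neg (show ¬ (1:Int) + g > 1 + c by omega),
          if_pos (show (1:Int) + c = 1 + c by omega)]
      by_cases ht : (t : Int) > (c : Int)
      · simp only [if_pos ht, if_pos (show (1:Int) + t > 1 + c by omega),
            if_neg (show ¬ (1:Int) + a = 1 + t by omega),
            if_neg (show ¬ (1:Int) + c = 1 + t by omega),
            if_neg (show ¬ (1:Int) + g = 1 + t by omega),
            if_pos (show (1:Int) + t = 1 + t by omega)]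
        simp only [if_true]
        first | rfl | (split_ifs <;> first | rfl | (exfalso; omega))
      · simp only [if_neg ht, if_neg (show ¬ (1:Int) + t > 1 + c by omega)]
        simp only [if_true]
        first | rfl | (split_ifs <;> first | rfl | (exfalso; omega))
  · simp only [if_neg hc, if_neg hc, if_neg (show ¬ (1:Int) + c > 1 + a by omega)]
    by_cases hg : (g : Int) > (a : Int)
    · simp only [if_pos hg, if_pos hg, if_pos (show (1:Int) + g > 1 + a by omega),
          if_neg (show ¬ (1:Int) + a = 1 + g by omega),
          if_neg (show ¬ (1:Int) + c = 1 + g by omega)]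
      by_cases ht : (t : Int) > (g : Int)
      · simp only [if_pos ht, if_pos (show (1:Int) + t > 1 + g by omega),
            if_neg (show ¬ (1:Int) + a = 1 + t by omega),
            if_neg (show ¬ (1:Int) + c = 1 + t by omega),
            if_neg (show ¬ (1:Int) + g = 1 + t by omega),
            if_pos (show (1:Int) + t = 1 + t by omega)]
        simp only [if_true]
        first | rfl | (split_ifs <;> first | rfl | (exfalso; omega))
      · simp only [if_neg ht, if_neg (show ¬ (1:Int) + t > 1 + g by omega),
            if_pos (show (1:Int) + g = 1 + g by omega)]
        simp only [if_true]
        first | rfl | (split_ifs <;> first | rfl | (exfalso; omega))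
    · simp only [if_neg hg, if_neg hg, if_neg (show ¬ (1:Int) + g > 1 + a by omega)]
      by_cases ht : (t : Int) > (a : Int)
      · simp only [if_pos ht, if_pos (show (1:Int) + t > 1 + a by omega),
            if_neg (show ¬ (1:Int) + a = 1 + t by omega),
            if_neg (show ¬ (1:Int) + c = 1 + t by omega),
            if_neg (show ¬ (1:Int) + g = 1 + t by omega),
            if_pos (show (1:Int) + t = 1 + t by omega)]
        simp only [if_true]
        first | rfl | (split_ifs <;> first | rfl | (exfalso; omega))
      · simp only [if_neg ht, if_neg (show ¬ (1:Int) + t > 1 + a by omega),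
            if_pos (show (1:Int) + a = 1 + a by omega)]
        simp only [if_true]
        first | rfl | (split_ifs <;> first | rfl | (exfalso; omega))

-- Pre_ makes every per-column generator succeed
lemma pvColChars_isSome (motifs : List Int) (stringList : List String) (t : Int) (c : Int)
    (h : ∀ row ∈ PySem.List.pyRange 0 t 1, pvLookupOk motifs stringList row c = true) :
    (pvColChars motifs stringList t c).isSome := by
  unfold pvColChars
  have main : ∀ (rows : List Int),
      (∀ row ∈ rows, pvLookupOk motifs stringList row c = true) →
      ∀ l0 : List Char,
      (rows.foldl (fun acc row =>
        acc.bind fun l =>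
          (PySem.List.pyGet? motifs row).bind fun m =>
          (PySem.List.pyGet? stringList row).bind fun s =>
          (PySem.Str.pyGet? s (m + c)).map fun ch => l ++ [pvNorm ch]) (some l0)).isSome := by
    intro rows
    induction rows with
    | nil => intro _ l0; simp
    | cons r rows ih =>
      intro hall l0
      have hr := hall r (by simp)
      rw [pvLookupOk_eq] at hr
      obtain ⟨ch, hch⟩ := Option.isSome_iff_exists.mp hr
      unfold pvLookup at hch
      simp only [List.foldl_cons, Option.bind_some]
      cases hm2 : PySem.List.pyGet? motifs r with
      | none => rw [hm2] at hch; simp at hch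
      | some m =>
        rw [hm2] at hch
        simp only [Option.bind_some] at hch ⊢
        cases hs2 : PySem.List.pyGet? stringList r with
        | none => rw [hs2] at hch; simp at hch
        | some s =>
          rw [hs2] at hch
          simp only [Option.bind_some] at hch ⊢
          rw [hch]
          exact ih (fun row hrow => hall row (by simp [hrow])) (l0 ++ [pvNorm ch])
  exact main _ h []

-- A's per-column body in terms of pvSel
set_option maxHeartbeats 1000000 in
lemma pvBodyA (P : List Int × List Int × List Int × List Int) (c : Int) (consensus : String) :
    (let m := (PySem.List.pyRange 0 4 1).foldl (fun m row =>
        if (pvRowAt P row).getD c.toNat 0 > m then (pvRowAt P row).getD c.toNat 0 else m) (-1)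
     if (pvRowAt P 0).getD c.toNat 0 = m then consensus ++ "A"
     else if (pvRowAt P 1).getD c.toNat 0 = m then consensus ++ "C"
     else if (pvRowAt P 2).getD c.toNat 0 = m then consensus ++ "G"
     else if (pvRowAt P 3).getD c.toNat 0 = m then consensus ++ "T"
     else consensus) = consensus ++ pvSel (pvValuesAt P c.toNat) := by
  have hR : PySem.List.pyRange 0 4 1 = [0, 1, 2, 3] := by decide
  rw [hR]
  unfold pvSel pvValuesAt pvRowAt
  simp only [List.foldl_cons, List.foldl_nil,
    show ((0:Int) = 0) = True from by simp, show ((1:Int) = 0) = False from by simp,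
    show ((2:Int) = 0) = False from by simp, show ((3:Int) = 0) = False from by simp,
    show ((1:Int) = 1) = True from by simp, show ((2:Int) = 1) = False from by simp,
    show ((3:Int) = 1) = False from by simp, show ((2:Int) = 2) = True from by simp,
    show ((3:Int) = 2) = False from by simp, if_true, if_false]
  split_ifs <;> first | rfl | simp

-- (L5) B's outer loop, all columns fine
lemma pvOuterB (motifs : List Int) (stringList : List String) (t : Int) :
    ∀ (L : List Int) (out : List String),
    (∀ c ∈ L, (pvColChars motifs stringList t c).isSome) →
    L.foldl (fun (acc : Option (List String)) column =>
      acc.bind fun out =>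
        match pvColChars motifs stringList t column with
        | none => none
        | some g =>
          let chars := PySem.List.sorted g (fun x => x) false
          some (out ++ [String.singleton (chars.foldl pvRunStep ('A', 0, none, 0)).1])) (some out) =
      some (out ++ L.map (fun c =>
        String.singleton
          (((PySem.List.sorted ((pvColChars motifs stringList t c).getD []) (fun x => x) false).foldl
            pvRunStep ('A', 0, none, 0)).1))) := by
  intro L
  induction L with
  | nil => intro out _; simp
  | cons c L ih =>
    intro out hsome
    obtain ⟨g, hg⟩ := Option.isSome_iff_exists.mp (hsome c (by simp))
    simp only [List.foldl_cons, Option.bind_some]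
    rw [hg]
    simp only []
    rw [ih _ (fun c' hc' => hsome c' (by simp [hc']))]
    simp [hg]

lemma pvStrFoldJoin (l : List String) : ∀ s : String,
    l.foldl (fun acc x => acc ++ x) s = s ++ PySem.Str.join "" l := by
  induction l with
  | nil =>
    intro s
    have : PySem.Str.join "" ([] : List String) = "" := by
      apply String.toList_inj.mp
      simp [PySem.Str.toList_join, PySem.Chars.join, List.intercalate]
    simp [this]
  | cons x l ih =>
    intro s
    have hj : PySem.Str.join "" (x :: l) = x ++ PySem.Str.join "" l := by
      apply String.toList_inj.mp
      simp [PySem.Str.toList_join, PySem.Chars.join]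
      cases l <;> simp [List.intercalate]
    simp only [List.foldl_cons, ih, hj, String.append_assoc]

-- ===== VERDICT (by name: the statement is the Claim_ definition above) =====
theorem get_consensus_motif_spec : Claim_equal_get_consensus_motif := by
  intro motifs k t stringList _ hpre
  unfold Spec_get_consensus_motif
  have hlook := pvPreLookup motifs k t stringList hpre
  have hchars : ∀ c ∈ PySem.List.pyRange 0 k 1, (pvColChars motifs stringList t c).isSome := by
    intro c hc
    exact pvColChars_isSome motifs stringList t c (fun row hrow => hlook c hc row hrow)
  have hsome : ∀ c ∈ PySem.List.pyRange 0 k 1, (pvColCnt motifs stringList t c).isSome := by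
    intro c hc
    rw [pvColCnt_eq_gq, Option.isSome_map]
    exact hchars c hc
  set L := PySem.List.pyRange 0 k 1 with hL
  set n := L.length with hn
  have hbound : ∀ c ∈ L, 0 ≤ c ∧ c.toNat < n := by
    intro c hc
    have := (PySem.List.mem_pyRange_one).mp hc
    have hlen : L.length = (k - 0).toNat := PySem.List.length_pyRange_one 0 k
    omega
  have hones : ∀ c ∈ L, pvValuesAt (List.replicate n (1:Int), List.replicate n (1:Int),
      List.replicate n (1:Int), List.replicate n (1:Int)) c.toNat = (1, 1, 1, 1) := by
    intro c hc
    have := (hbound c hc).2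
    simp [pvValuesAt, List.getD, List.getElem?_replicate, this]
  obtain ⟨P, hP, hPvals, _⟩ := pvOuterA motifs stringList t L
    (List.replicate n (1:Int), List.replicate n (1:Int), List.replicate n (1:Int),
      List.replicate n (1:Int)) n
    (by simp) (by simp) (by simp) (by simp) hbound (PySem.List.nodup_pyRange_one 0 k) hones hsome
  have hmp : make_Profile motifs k t stringList = some P := by
    unfold make_Profile
    rw [← hL]
    simp only [pvInitA, ← hn]
    exact hP
  have hred : get_consensus_motif motifs k t stringList =
      L.foldl (fun consensus column =>
        let m := (PySem.List.pyRange 0 4 1).foldl (fun m row =>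
            if (pvRowAt P row).getD column.toNat 0 > m then (pvRowAt P row).getD column.toNat 0 else m) (-1)
        if (pvRowAt P 0).getD column.toNat 0 = m then consensus ++ "A"
        else if (pvRowAt P 1).getD column.toNat 0 = m then consensus ++ "C"
        else if (pvRowAt P 2).getD column.toNat 0 = m then consensus ++ "G"
        else if (pvRowAt P 3).getD column.toNat 0 = m then consensus ++ "T"
        else consensus) "" := by
    unfold get_consensus_motif
    rw [hmp, ← hL]
  have hA : get_consensus_motif motifs k t stringList =
      L.foldl (fun consensus column =>
        consensus ++ pvSel (pvGQ ((pvColChars motifs stringList t column).getD []))) "" := by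
    rw [hred]
    refine PySem.List.foldl_congr_mem L _ _ "" ?_
    intro acc c hc
    rw [pvBodyA P c acc]
    obtain ⟨l, hl⟩ := Option.isSome_iff_exists.mp (hchars c hc)
    have hq : pvColCnt motifs stringList t c = some (pvGQ l) := by
      rw [pvColCnt_eq_gq, hl]; rfl
    rw [hPvals c hc _ hq, hl]
    rfl
  have hB : get_consensus_motif_alt motifs k t stringList =
      PySem.Str.join "" (L.map (fun c =>
        String.singleton
          (((PySem.List.sorted ((pvColChars motifs stringList t c).getD []) (fun x => x) false).foldl
            pvRunStep ('A', 0, none, 0)).1))) := by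
    unfold get_consensus_motif_alt
    rw [← hL, pvOuterB motifs stringList t L [] hchars]
    rfl
  rw [hA, hB]
  have step1 : L.foldl (fun consensus column =>
      consensus ++ pvSel (pvGQ ((pvColChars motifs stringList t column).getD []))) "" =
    L.foldl (fun consensus column =>
      consensus ++ String.singleton
        (((PySem.List.sorted ((pvColChars motifs stringList t column).getD []) (fun x => x) false).foldl
          pvRunStep ('A', 0, none, 0)).1)) "" := by
    refine PySem.List.foldl_congr_mem L _ _ "" ?_
    intro acc c hc
    obtain ⟨l, hl⟩ := Option.isSome_iff_exists.mp (hchars c hc)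
    rw [hl]
    simp only [Option.getD_some]
    rw [pvColLetter l (pvColChars_alpha motifs stringList t c l hl)]
  rw [step1, ← List.foldl_map, pvStrFoldJoin]
  apply String.toList_inj.mp
  simp [PySem.Str.toList_join]
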